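-- pv_equiv track=rewrite | github.com/kilomeow/git-data-tools | diff.py | parse_numeric
-- ===== SOURCE A (Python) =====
-- def parse_numeric(s):
--     a = [str()]
--     for c in s:
--         if c.isnumeric():
--             a[-1] += c
--         else:
--             if a[-1]: a.append(str())
--     if not a[-1]: a.pop(-1)
--     return tuple(map(int, a))
-- ===== SOURCE B (Python) =====
-- def parse_numeric(s):
--     nums = []
--     n = len(s)
--     i = 0
--     while i < n:
--         if s[i].isnumeric():
--             j = i + 1
--             while j < n and s[j].isnumeric():
--                 j += 1
--             nums.append(int(s[i:j]))
--             i = j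
--         else:
--             i += 1
--     return tuple(nums)
-- ===== Notes on version B (the rewrite author's own statement) =====
-- stated objective: alternative
-- what changed: Replaces A's accumulator list of growing strings with sentinel empty-string/pop boundary logic by a two-pointer index scan: the outer loop skips non-numeric characters, the inner loop advances past each maximal numeric run, which is sliced out and converted once.
import Mathlib
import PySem

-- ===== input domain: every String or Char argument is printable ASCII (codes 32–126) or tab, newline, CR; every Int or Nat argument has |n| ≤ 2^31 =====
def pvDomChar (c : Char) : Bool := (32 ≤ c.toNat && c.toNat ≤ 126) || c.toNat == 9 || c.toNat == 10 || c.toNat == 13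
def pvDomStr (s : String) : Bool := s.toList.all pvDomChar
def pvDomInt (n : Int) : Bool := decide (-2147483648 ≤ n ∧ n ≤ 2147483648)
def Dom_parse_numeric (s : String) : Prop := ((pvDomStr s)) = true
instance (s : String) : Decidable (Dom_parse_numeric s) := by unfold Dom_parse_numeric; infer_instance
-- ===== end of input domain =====

-- B replaces A's accumulator list of growing strings (sentinel-empty-string boundary logic)
-- by a two-pointer index scan: skip non-numeric chars, advance past each maximal numeric run,
-- slice it out and convert it once (alternative decomposition, same cost).

-- int(r) for a run r; on every run both programs build, r is a nonempty digit string, so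
-- PySem.Int.ofChars? is some and the getD default is unreachable.
def pnInt (r : List Char) : Int := (PySem.Int.ofChars? r).getD 0

-- ===== PORT A =====
-- c.isnumeric() is ported as PySem.Chars.isdigit, exact on the ASCII domain Dom_parse_numeric.
-- one loop step of A: extend a[-1] by a digit, or close a nonempty a[-1] by appending ""
def pnStep (a : List (List Char)) (c : Char) : List (List Char) :=
  if PySem.Chars.isdigit c then a.dropLast ++ [a.getLastD [] ++ [c]]
  else if a.getLastD [] ≠ [] then a ++ [[]] else a

def parse_numeric (s : String) : List Int :=
  let a := s.toList.foldl pnStep [[]]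
  let a := if a.getLastD [] = [] then a.dropLast else a
  a.map pnInt

-- ===== PORT B =====
-- the inner while of Source B: advance j past the numeric run
-- (fuel = remaining indices, makes the while-loop recursion structural; the guard j < length
--  already stops the loop before fuel runs out, so fuel never changes the computed value)
def pnScanJ (s : List Char) : Nat → Nat → Nat
  | 0, j => j
  | fuel + 1, j =>
    if h : j < s.length then
      if PySem.Chars.isdigit s[j] then pnScanJ s fuel (j + 1) else j
    else j

-- the outer while of Source B over index i (fuel as above)
def pnOuter (s : List Char) : Nat → Nat → List Int
  | 0, _ => []
  | fuel + 1, i =>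
    if h : i < s.length then
      if PySem.Chars.isdigit s[i] then
        pnInt (PySem.List.slice s (some (i : Int))
            (some ((pnScanJ s (s.length - (i + 1)) (i + 1) : Nat) : Int)))
          :: pnOuter s fuel (pnScanJ s (s.length - (i + 1)) (i + 1))
      else pnOuter s fuel (i + 1)
    else []

def parse_numeric_alt (s : String) : List Int := pnOuter s.toList s.toList.length 0

-- ===== PRECONDITION & SPEC =====
def Spec_parse_numeric (s : String) (out : List Int) : Prop := out = parse_numeric_alt s
instance (s : String) (out : List Int) : Decidable (Spec_parse_numeric s out) := by unfold Spec_parse_numeric; infer_instance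

-- ===== CLAIM (what is proved, stated in full; the proofs are below) =====
def Claim_equal_parse_numeric : Prop := ∀ (s : String), Dom_parse_numeric s → Spec_parse_numeric s (parse_numeric s)

-- ===== LEMMAS AND PROOFS =====

-- canonical run decomposition: pnR cur cs = the maximal digit runs of cur ++ cs, where cur is an
-- open run being built
def pnR (cur : List Char) : List Char → List (List Char)
  | [] => if cur = [] then [] else [cur]
  | c :: cs =>
    if PySem.Chars.isdigit c then pnR (cur ++ [c]) cs
    else (if cur = [] then [] else [cur]) ++ pnR [] cs

-- A's accumulator after the loop, split as done ++ pnA cur cs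
def pnA (cur : List Char) : List Char → List (List Char)
  | [] => [cur]
  | c :: cs =>
    if PySem.Chars.isdigit c then pnA (cur ++ [c]) cs
    else if cur ≠ [] then cur :: pnA [] cs else pnA [] cs

theorem pnA_ne_nil (cs : List Char) (cur : List Char) : pnA cur cs ≠ [] := by
  induction cs generalizing cur with
  | nil => simp [pnA]
  | cons c cs ih =>
    simp only [pnA]
    split
    · exact ih _
    · split
      · simp
      · exact ih _

theorem foldl_pnStep (cs : List Char) (done : List (List Char)) (cur : List Char) :
    List.foldl pnStep (done ++ [cur]) cs = done ++ pnA cur cs := by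
  induction cs generalizing done cur with
  | nil => simp [pnA]
  | cons c cs ih =>
    simp only [List.foldl_cons, pnStep, pnA]
    by_cases hd : PySem.Chars.isdigit c = true
    · simp only [hd, if_pos, List.dropLast_concat, List.getLastD_concat]
      rw [← ih done (cur ++ [c])]
    · simp only [hd, if_neg, Bool.false_eq_true, not_false_eq_true]
      by_cases hc : cur = []
      · subst hc
        simp only [List.getLastD_concat, ne_eq, not_true_eq_false, if_false, ih]
      · simp only [List.getLastD_concat, hc, ne_eq, not_false_eq_true, if_pos]
        rw [ih (done ++ [cur]) []]
        simp

theorem cons_getLastD {α : Type} (a : α) (l : List α) (d : α) (h : l ≠ []) :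
    (a :: l).getLastD d = l.getLastD d := by
  cases l with
  | nil => exact absurd rfl h
  | cons b t => simp

theorem cons_dropLast {α : Type} (a : α) (l : List α) (h : l ≠ []) :
    (a :: l).dropLast = a :: l.dropLast := by
  cases l with
  | nil => exact absurd rfl h
  | cons b t => simp

-- finalize = A's trailing `if not a[-1]: a.pop(-1)`
theorem finalize_pnA (cs : List Char) (cur : List Char) :
    (if (pnA cur cs).getLastD [] = [] then (pnA cur cs).dropLast else pnA cur cs) = pnR cur cs := by
  induction cs generalizing cur with
  | nil =>
    simp only [pnA, pnR, List.getLastD_cons, List.getLastD_nil]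
    by_cases hc : cur = [] <;> simp [hc]
  | cons c cs ih =>
    simp only [pnA, pnR]
    by_cases hd : PySem.Chars.isdigit c = true
    · simp only [hd, if_pos, ih]
    · simp only [hd, Bool.false_eq_true, if_neg, not_false_eq_true]
      by_cases hc : cur = []
      · simp only [hc, ne_eq, not_true_eq_false, if_false]
        exact ih []
      · simp only [hc, ne_eq, not_false_eq_true, if_pos]
        have hne := pnA_ne_nil cs ([] : List Char)
        rw [cons_getLastD _ _ _ hne, cons_dropLast _ _ hne]
        by_cases hl : (pnA [] cs).getLastD [] = []
        · rw [if_pos hl, ← ih [], if_pos hl]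
          simp
        · rw [if_neg hl, ← ih [], if_neg hl]
          simp

def pnSpan : List Char → List Char × List Char
  | [] => ([], [])
  | c :: cs => if PySem.Chars.isdigit c then
      let p := pnSpan cs
      (c :: p.1, p.2)
    else ([], c :: cs)

-- B's j-scan vs the canonical decomposition with a nonempty open run
theorem pnR_span (cs : List Char) (cur : List Char) (h : cur ≠ []) :
    pnR cur cs = (cur ++ (pnSpan cs).1) :: pnR [] (pnSpan cs).2 := by
  induction cs generalizing cur with
  | nil => simp [pnR, pnSpan, h]
  | cons c cs ih =>
    simp only [pnR, pnSpan]
    by_cases hd : PySem.Chars.isdigit c = true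
    · simp only [hd, if_pos]
      rw [ih (cur ++ [c]) (by simp)]
      simp
    · have hr : pnR ([] : List Char) (c :: cs) = pnR [] cs := by
        conv_lhs => simp only [pnR]
        rw [if_neg hd]
        simp
      simp only [hd, Bool.false_eq_true]
      rw [if_neg h]
      simp [hr]

theorem pnSpan_take (l : List Char) : l.take (pnSpan l).1.length = (pnSpan l).1 := by
  induction l with
  | nil => simp [pnSpan]
  | cons c cs ih =>
    simp only [pnSpan]
    by_cases hd : PySem.Chars.isdigit c = true
    · simp [hd, ih]
    · simp [hd]

theorem pnSpan_drop (l : List Char) : l.drop (pnSpan l).1.length = (pnSpan l).2 := by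
  induction l with
  | nil => simp [pnSpan]
  | cons c cs ih =>
    simp only [pnSpan]
    by_cases hd : PySem.Chars.isdigit c = true
    · simp [hd, ih]
    · simp [hd]

theorem pnScanJ_spec (s : List Char) (fuel j : Nat) (hf : s.length - j ≤ fuel) :
    pnScanJ s fuel j = j + (pnSpan (s.drop j)).1.length := by
  induction fuel generalizing j with
  | zero =>
    rw [pnScanJ, List.drop_eq_nil_of_le (by omega)]
    simp [pnSpan]
  | succ fuel ih =>
    by_cases h : j < s.length
    · rw [pnScanJ, dif_pos h]
      by_cases hd : PySem.Chars.isdigit s[j] = true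
      · rw [if_pos hd, ih (j + 1) (by omega), List.drop_eq_getElem_cons h]
        simp only [pnSpan, hd, if_pos, List.length_cons]
        omega
      · rw [if_neg hd, List.drop_eq_getElem_cons h]
        simp only [pnSpan]
        rw [if_neg hd]
        simp
    · rw [pnScanJ, dif_neg h, List.drop_eq_nil_of_le (by omega)]
      simp [pnSpan]

theorem pnOuter_eq (s : List Char) (fuel i : Nat) (hf : s.length - i ≤ fuel) :
    pnOuter s fuel i = List.map pnInt (pnR [] (s.drop i)) := by
  induction fuel generalizing i with
  | zero =>
    rw [pnOuter, List.drop_eq_nil_of_le (by omega)]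
    simp [pnR]
  | succ fuel ih =>
    by_cases h : i < s.length
    · rw [pnOuter, dif_pos h]
      by_cases hd : PySem.Chars.isdigit s[i] = true
      · rw [if_pos hd]
        have hdrop : s.drop i = s[i] :: s.drop (i + 1) := List.drop_eq_getElem_cons h
        have hj : pnScanJ s (s.length - (i + 1)) (i + 1)
            = (i + 1) + (pnSpan (s.drop (i + 1))).1.length :=
          pnScanJ_spec s _ (i + 1) (by omega)
        have hlen : (pnSpan (s.drop (i + 1))).1.length ≤ s.length - (i + 1) := by
          have h1 := pnSpan_take (s.drop (i + 1))
          have h2 : (List.take (pnSpan (List.drop (i + 1) s)).1.length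
              (List.drop (i + 1) s)).length ≤ (s.drop (i + 1)).length := by
            simp
          rw [h1] at h2
          simp at h2
          omega
        have hslice : PySem.List.slice s (some (i : Int))
            (some ((pnScanJ s (s.length - (i + 1)) (i + 1) : Nat) : Int))
            = s[i] :: (pnSpan (s.drop (i + 1))).1 := by
          rw [PySem.List.slice_natCast, hj, hdrop]
          have : i + 1 + (pnSpan (s.drop (i + 1))).1.length - i
              = (pnSpan (s.drop (i + 1))).1.length + 1 := by omega
          rw [this, List.take_succ_cons, pnSpan_take]
        have hdropj : s.drop (pnScanJ s (s.length - (i + 1)) (i + 1))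
            = (pnSpan (s.drop (i + 1))).2 := by
          rw [hj, ← List.drop_drop, pnSpan_drop]
        have hR : pnR [] (s.drop i)
            = (s[i] :: (pnSpan (s.drop (i + 1))).1) :: pnR [] (pnSpan (s.drop (i + 1))).2 := by
          rw [hdrop]
          simp only [pnR]
          rw [if_pos hd]
          simp only [List.nil_append]
          rw [pnR_span (s.drop (i + 1)) [s[i]] (by simp)]
          simp
        rw [ih _ (by omega), hslice, hdropj, hR, List.map_cons]
      · rw [if_neg hd, ih (i + 1) (by omega), List.drop_eq_getElem_cons h]
        conv_rhs => simp only [pnR]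
        rw [if_neg hd]
        simp
    · rw [pnOuter, dif_neg h, List.drop_eq_nil_of_le (by omega)]
      simp [pnR]

-- ===== VERDICT (by name: the statement is the Claim_ definition above) =====
theorem parse_numeric_spec : Claim_equal_parse_numeric := by
  intro s _
  unfold Spec_parse_numeric parse_numeric parse_numeric_alt
  have h0 : ([[]] : List (List Char)) = [] ++ [[]] := by simp
  rw [h0, foldl_pnStep s.toList [] []]
  simp only [List.nil_append]
  rw [finalize_pnA s.toList []]
  rw [pnOuter_eq s.toList s.toList.length 0 (by omega), List.drop_zero]
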